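-- pv_equiv track=rewrite | github.com/ulyweb/python | seed_vault/seed_vault_v1.3.py | parse_indices_input
-- ===== SOURCE A (Python) =====
-- from typing import List, Dict, Any, Tuple, Set, Optional
--
-- def parse_indices_input(s: str, total: int) -> List[int]:
--     parts = [p.strip() for p in s.replace(",", " ").split() if p.strip()]
--     indices = []
--     for p in parts:
--         if not p.isdigit():
--             raise ValueError(f"Invalid index: {p}")
--         i = int(p)
--         if not (1 <= i <= total):
--             raise ValueError(f"Index out of range: {i} (1..{total})")
--         indices.append(i)
--     return sorted(set(indices))
-- ===== SOURCE B (Python) =====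
-- from typing import List
--
-- def _check_index(p: str, total: int) -> int:
--     if not p.isdigit():
--         raise ValueError(f"Invalid index: {p}")
--     i = int(p)
--     if not (1 <= i <= total):
--         raise ValueError(f"Index out of range: {i} (1..{total})")
--     return i
--
-- def _insert_unique(lst: List[int], x: int) -> List[int]:
--     # insert x into the sorted duplicate-free list lst, keeping it sorted and duplicate-free
--     for k, y in enumerate(lst):
--         if x < y:
--             return lst[:k] + [x] + lst[k:]
--         if x == y:
--             return lst
--     return lst + [x]
--
-- def parse_indices_input(s: str, total: int) -> List[int]:
--     result: List[int] = []
--     for p in s.replace(",", " ").split():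
--         result = _insert_unique(result, _check_index(p, total))
--     return result
-- ===== Notes on version B (the rewrite author's own statement) =====
-- stated objective: alternative
-- what changed: B keeps an ordered-insert invariant: each validated index is inserted into its sorted position in a duplicate-free list as the tokens are scanned (same first-failure ValueErrors), instead of A's append-then-sorted(set(...)) postpass; A's redundant per-token strip/filter comprehension is dropped since split() already yields stripped nonempty tokens.
import Mathlib
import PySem

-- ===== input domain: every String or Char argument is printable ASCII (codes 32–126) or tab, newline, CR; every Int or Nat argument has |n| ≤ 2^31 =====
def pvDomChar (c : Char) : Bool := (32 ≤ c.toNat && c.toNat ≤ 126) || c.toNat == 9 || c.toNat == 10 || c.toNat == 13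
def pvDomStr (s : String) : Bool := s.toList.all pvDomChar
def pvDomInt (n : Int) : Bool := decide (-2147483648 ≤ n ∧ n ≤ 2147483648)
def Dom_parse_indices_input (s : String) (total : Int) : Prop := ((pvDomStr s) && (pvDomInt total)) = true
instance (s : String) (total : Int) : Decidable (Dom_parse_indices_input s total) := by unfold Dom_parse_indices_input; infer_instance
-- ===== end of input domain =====

-- B replaces A's append-then-sorted(set(...)) postpass by ordered duplicate-free insertion
-- during the single validation scan (same first-failure ValueErrors): an alternative
-- decomposition of the same cost class, not claimed faster.


-- ===== PORT A =====
-- the for-loop over parts: validates each token and appends int(p); none = the raised ValueError.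
-- int(p) after the isdigit check never raises, so `(ofStr? p).getD 0` is exact there (the default is never taken).
def pvA_loop (total : Int) : List String → List Int → Option (List Int)
  | [], indices => some indices
  | p :: ps, indices =>
    if PySem.Str.strIsdigit p then
      let i := (PySem.Int.ofStr? p).getD 0
      if 1 ≤ i ∧ i ≤ total then pvA_loop total ps (indices ++ [i]) else none
    else none

def parse_indices_input (s : String) (total : Int) : List Int :=
  match pvA_loop total (((PySem.Str.split₀ (PySem.Str.replace s "," " ")).filter
      (fun p => !(PySem.Str.strip p == ""))).map PySem.Str.strip) [] with
  | some indices => PySem.List.sorted (PySem.Set.ofList indices) (fun x => x) false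
  | none => []   -- ValueError was raised: these inputs are excluded by Pre_

-- ===== PORT B =====
-- _check_index: none = the raised ValueError (int(p) after isdigit never raises, as above)
def pvCheck? (p : String) (total : Int) : Option Int :=
  if PySem.Str.strIsdigit p then
    let i := (PySem.Int.ofStr? p).getD 0
    if 1 ≤ i ∧ i ≤ total then some i else none
  else none

-- _insert_unique: the for/enumerate scan; the already-scanned prefix lst[:k] is kept
-- by the recursion in place of the slice, the early returns are the first two branches.
def pvInsertUnique : List Int → Int → List Int
  | [], x => [x]
  | y :: rest, x =>
    if x < y then x :: y :: rest
    else if x = y then y :: rest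
    else y :: pvInsertUnique rest x

def pvB_loop (total : Int) : List String → List Int → Option (List Int)
  | [], result => some result
  | p :: ps, result =>
    match pvCheck? p total with
    | some i => pvB_loop total ps (pvInsertUnique result i)
    | none => none

def parse_indices_input_alt (s : String) (total : Int) : List Int :=
  match pvB_loop total (PySem.Str.split₀ (PySem.Str.replace s "," " ")) [] with
  | some result => result
  | none => []   -- ValueError was raised: these inputs are excluded by Pre_

-- ===== PRECONDITION & SPEC =====
-- Pre_ excludes exactly the inputs on which A raises ValueError: a token that is not all
-- digits, or whose value lies outside 1..total.
def Pre_parse_indices_input (s : String) (total : Int) : Prop :=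
  ∀ p ∈ PySem.Str.split₀ (PySem.Str.replace s "," " "),
    PySem.Str.strIsdigit p = true ∧
    1 ≤ (PySem.Int.ofStr? p).getD 0 ∧ (PySem.Int.ofStr? p).getD 0 ≤ total
instance (s : String) (total : Int) : Decidable (Pre_parse_indices_input s total) := by
  unfold Pre_parse_indices_input; infer_instance

def pvWitness_parse_indices_input : String × Int := ("3, 1 2, 3", 5)

def Spec_parse_indices_input (s : String) (total : Int) (out : List Int) : Prop := out = parse_indices_input_alt s total
instance (s : String) (total : Int) (out : List Int) : Decidable (Spec_parse_indices_input s total out) := by unfold Spec_parse_indices_input; infer_instance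

-- ===== CLAIM (what is proved, stated in full; the proofs are below) =====
def Claim_equal_parse_indices_input : Prop := ∀ (s : String) (total : Int), Dom_parse_indices_input s total → Pre_parse_indices_input s total → Spec_parse_indices_input s total (parse_indices_input s total)

-- ===== LEMMAS AND PROOFS =====

theorem pvWitness_ok :
    Dom_parse_indices_input pvWitness_parse_indices_input.1 pvWitness_parse_indices_input.2 ∧
    Pre_parse_indices_input pvWitness_parse_indices_input.1 pvWitness_parse_indices_input.2 := by
  decide

-- every token produced by split() is nonempty and whitespace-free (invariant of split₀.go)
theorem pv_go_inv (s cur : List Char) (acc : List (List Char))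
    (hc : ∀ c ∈ cur, PySem.Chars.isspace c = false)
    (ha : ∀ p ∈ acc, p ≠ [] ∧ ∀ c ∈ p, PySem.Chars.isspace c = false) :
    ∀ p ∈ PySem.Chars.split₀.go s cur acc, p ≠ [] ∧ ∀ c ∈ p, PySem.Chars.isspace c = false := by
  induction s generalizing cur acc with
  | nil =>
    intro p hp
    simp only [PySem.Chars.split₀.go] at hp
    split at hp
    · exact ha _ (by simpa using hp)
    · rename_i h
      simp at hp
      rcases hp with hp | hp
      · exact ha _ hp
      · subst hp
        refine ⟨by simp [List.isEmpty_iff] at h; simpa using h, ?_⟩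
        intro c hc'; exact hc c (by simpa using hc')
  | cons c rest ih =>
    intro p hp
    simp only [PySem.Chars.split₀.go] at hp
    split at hp
    · split at hp
      · exact ih [] acc (by simp) ha p hp
      · refine ih [] _ (by simp) ?_ p hp
        intro q hq
        simp at hq
        rcases hq with hq | hq
        · subst hq
          rename_i hsp hne
          refine ⟨by simp [List.isEmpty_iff] at hne; simpa using hne, ?_⟩
          intro d hd; exact hc d (by simpa using hd)
        · exact ha _ hq
    · rename_i hsp
      refine ih (c :: cur) acc ?_ ha p hp
      intro d hd
      rcases List.mem_cons.mp hd with h | h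
      · subst h; simpa using hsp
      · exact hc d h

theorem pv_token_inv (l : List Char) (p : List Char) (hp : p ∈ PySem.Chars.split₀ l) :
    p ≠ [] ∧ ∀ c ∈ p, PySem.Chars.isspace c = false := by
  have := pv_go_inv l [] [] (by simp) (by simp)
  exact this p (by simpa [PySem.Chars.split₀] using hp)

theorem pv_dropWhile_eq_self {P : Char → Bool} (l : List Char)
    (h : ∀ c ∈ l, P c = false) : List.dropWhile P l = l := by
  cases l with
  | nil => rfl
  | cons c t => simp [List.dropWhile, h c (by simp)]

theorem pv_strip_eq_self (p : List Char) (h : ∀ c ∈ p, PySem.Chars.isspace c = false) :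
    PySem.Chars.strip p = p := by
  simp only [PySem.Chars.strip, PySem.Chars.lstrip, PySem.Chars.rstrip]
  rw [pv_dropWhile_eq_self p h, pv_dropWhile_eq_self p.reverse (by simpa using h)]
  simp

-- A's comprehension [p.strip() for p in … .split() if p.strip()] leaves the tokens unchanged
theorem pv_parts_eq (r : String) :
    ((PySem.Str.split₀ r).filter (fun p => !(PySem.Str.strip p == ""))).map PySem.Str.strip
      = PySem.Str.split₀ r := by
  have hstrip : ∀ p ∈ PySem.Str.split₀ r, PySem.Str.strip p = p ∧ p ≠ "" := by
    intro p hp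
    have hmem : p.toList ∈ PySem.Chars.split₀ r.toList := by
      have := PySem.Str.split₀_map_toList r
      rw [← this]
      exact List.mem_map_of_mem hp
    obtain ⟨hne, hns⟩ := pv_token_inv r.toList p.toList hmem
    have hs : (PySem.Str.strip p).toList = p.toList := by
      rw [PySem.Str.toList_strip, pv_strip_eq_self _ hns]
    refine ⟨?_, ?_⟩
    · apply String.toList_injective hs
    · intro h; subst h; simp at hne
  have hfil : (PySem.Str.split₀ r).filter (fun p => !(PySem.Str.strip p == "")) = PySem.Str.split₀ r := by
    apply List.filter_eq_self.mpr
    intro p hp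
    obtain ⟨h1, h2⟩ := hstrip p hp
    simp [h1, h2]
  rw [hfil]
  have : ∀ p ∈ PySem.Str.split₀ r, PySem.Str.strip p = p := fun p hp => (hstrip p hp).1
  calc (PySem.Str.split₀ r).map PySem.Str.strip
      = (PySem.Str.split₀ r).map id := List.map_congr_left this
    _ = PySem.Str.split₀ r := List.map_id _

-- the A loop succeeds and appends the token values, left to right
theorem pv_A_loop_eq (total : Int) (ps : List String) (acc : List Int)
    (h : ∀ p ∈ ps, PySem.Str.strIsdigit p = true ∧
        1 ≤ (PySem.Int.ofStr? p).getD 0 ∧ (PySem.Int.ofStr? p).getD 0 ≤ total) :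
    pvA_loop total ps acc = some (acc ++ ps.map (fun p => (PySem.Int.ofStr? p).getD 0)) := by
  induction ps generalizing acc with
  | nil => simp [pvA_loop]
  | cons p ps ih =>
    obtain ⟨h1, h2, h3⟩ := h p (by simp)
    simp only [pvA_loop, h1, if_true]
    rw [if_pos ⟨h2, h3⟩, ih _ (fun q hq => h q (by simp [hq]))]
    simp

-- the B loop succeeds and folds the token values into the sorted accumulator
theorem pv_B_loop_eq (total : Int) (ps : List String) (r : List Int)
    (h : ∀ p ∈ ps, PySem.Str.strIsdigit p = true ∧
        1 ≤ (PySem.Int.ofStr? p).getD 0 ∧ (PySem.Int.ofStr? p).getD 0 ≤ total) :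
    pvB_loop total ps r
      = some ((ps.map (fun p => (PySem.Int.ofStr? p).getD 0)).foldl pvInsertUnique r) := by
  induction ps generalizing r with
  | nil => simp [pvB_loop]
  | cons p ps ih =>
    obtain ⟨h1, h2, h3⟩ := h p (by simp)
    simp only [pvB_loop, pvCheck?, h1, if_true]
    rw [if_pos ⟨h2, h3⟩]
    simp only [List.map_cons, List.foldl_cons]
    exact ih _ (fun q hq => h q (by simp [hq]))

theorem pv_mem_insertUnique (lst : List Int) (x a : Int) :
    a ∈ pvInsertUnique lst x ↔ a = x ∨ a ∈ lst := by
  induction lst with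
  | nil => simp [pvInsertUnique]
  | cons y rest ih =>
    by_cases h1 : x < y
    · simp [pvInsertUnique, h1]
    · by_cases h2 : x = y
      · subst h2
        simp only [pvInsertUnique, if_neg h1, if_true, List.mem_cons]
        tauto
      · simp only [pvInsertUnique, if_neg h1, if_neg h2, List.mem_cons, ih]
        tauto

theorem pv_pairwise_insertUnique (lst : List Int) (x : Int)
    (h : lst.Pairwise (· < ·)) : (pvInsertUnique lst x).Pairwise (· < ·) := by
  induction lst with
  | nil => simp [pvInsertUnique]
  | cons y rest ih =>
    rw [List.pairwise_cons] at h
    obtain ⟨hy, hrest⟩ := h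
    by_cases h1 : x < y
    · simp only [pvInsertUnique, if_pos h1]
      rw [List.pairwise_cons]
      refine ⟨?_, List.pairwise_cons.mpr ⟨hy, hrest⟩⟩
      intro a ha
      rcases List.mem_cons.mp ha with h | h
      · subst h; exact h1
      · exact lt_trans h1 (hy a h)
    · by_cases h2 : x = y
      · simp only [pvInsertUnique, if_neg h1, if_pos h2]
        exact List.pairwise_cons.mpr ⟨hy, hrest⟩
      · simp only [pvInsertUnique, if_neg h1, if_neg h2]
        rw [List.pairwise_cons]
        refine ⟨?_, ih hrest⟩
        intro a ha
        rcases (pv_mem_insertUnique rest x a).mp ha with h | h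
        · subst h; omega
        · exact hy a h

theorem pv_foldl_insertUnique (l : List Int) (r : List Int) (hr : r.Pairwise (· < ·)) :
    (l.foldl pvInsertUnique r).Pairwise (· < ·) ∧
    ∀ a, a ∈ l.foldl pvInsertUnique r ↔ a ∈ r ∨ a ∈ l := by
  induction l generalizing r with
  | nil => simp [hr]
  | cons x t ih =>
    obtain ⟨hp, hm⟩ := ih (pvInsertUnique r x) (pv_pairwise_insertUnique r x hr)
    refine ⟨hp, ?_⟩
    intro a
    rw [List.foldl_cons, hm a, pv_mem_insertUnique]
    simp
    tauto

-- sorted(set(l)) is the ordered-insert fold of l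
theorem pv_sorted_set_eq_fold (l : List Int) :
    PySem.List.sorted (PySem.Set.ofList l) (fun x => x) false = l.foldl pvInsertUnique [] := by
  obtain ⟨hp, hm⟩ := pv_foldl_insertUnique l [] (by simp)
  apply PySem.List.sorted_eq_of_perm_of_pairwise_lt
  · rw [List.perm_ext_iff_of_nodup (hp.imp (fun h => ne_of_lt h)) (PySem.Set.nodup_ofList l)]
    intro a
    rw [hm a, PySem.Set.mem_ofList]
    simp
  · exact hp

-- ===== VERDICT (by name: the statement is the Claim_ definition above) =====
theorem parse_indices_input_spec : Claim_equal_parse_indices_input := by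
  intro s total _ hpre
  unfold Spec_parse_indices_input parse_indices_input parse_indices_input_alt
  rw [pv_parts_eq, pv_A_loop_eq total _ [] hpre, pv_B_loop_eq total _ [] hpre]
  simp only [List.nil_append]
  exact pv_sorted_set_eq_fold _
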